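-- pv_equiv track=rewrite | github.com/hyejinny97/Coding-Test | Programmers/Lv.1/모의고사.py | solution
-- ===== SOURCE A (Python) =====
-- def solution(answers):
--     fst = [1, 2, 3, 4, 5]   # 1번 수포자
--     sec = [2, 1, 2, 3, 2, 4, 2, 5]   # 2번 수포자
--     thd = [3, 3, 1, 1, 2, 2, 4, 4, 5, 5]   # 3번 수포자
--
--     # 문제의 정답을 순회
--     scores = [0] * 4   # 인덱스:1~3번 수포자, 값:점수
--     for num in range(len(answers)):   # 현재 정답 비교하는 문제의 번호
--         if fst[num % len(fst)] == answers[num]: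
--             scores[1] += 1
--         if sec[num % len(sec)] == answers[num]:
--             scores[2] += 1
--         if thd[num % len(thd)] == answers[num]:
--             scores[3] += 1
--
--     # 가장 높은 점수를 받은 사람 확인
--     max_score = max(scores)
--     top_rank = [i for i in range(1, 3 + 1) if scores[i] == max_score]   # 가장 높은 점수를 받은 사람
--
--     return sorted(top_rank)
-- ===== SOURCE B (Python) =====
-- def solution(answers):
--     # Pattern positions repeat with period lcm(5, 8, 10) = 40, so a histogram of
--     # (index mod 40, answer) pairs determines every score: one pass to build it,
--     # then each score is a 40-term lookup sum, independent of len(answers).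
--     hist = {}
--     for i, a in enumerate(answers):
--         k = (i % 40, a)
--         hist[k] = hist.get(k, 0) + 1
--     patterns = [[1, 2, 3, 4, 5],
--                 [2, 1, 2, 3, 2, 4, 2, 5],
--                 [3, 3, 1, 1, 2, 2, 4, 4, 5, 5]]
--     scores = [sum(hist.get((r, pat[r % len(pat)]), 0) for r in range(40))
--               for pat in patterns]
--     best = max(scores)
--     return [k for k in (1, 2, 3) if scores[k - 1] == best]
-- ===== Notes on version B (the rewrite author's own statement) =====
-- stated objective: alternative
-- what changed: Instead of comparing each answer against the three patterns, B builds a histogram of (index mod 40, answer) pairs in one pass (40 = lcm of the pattern lengths) and computes each supervisor's score as a 40-term lookup sum over that histogram.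
import Mathlib
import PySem

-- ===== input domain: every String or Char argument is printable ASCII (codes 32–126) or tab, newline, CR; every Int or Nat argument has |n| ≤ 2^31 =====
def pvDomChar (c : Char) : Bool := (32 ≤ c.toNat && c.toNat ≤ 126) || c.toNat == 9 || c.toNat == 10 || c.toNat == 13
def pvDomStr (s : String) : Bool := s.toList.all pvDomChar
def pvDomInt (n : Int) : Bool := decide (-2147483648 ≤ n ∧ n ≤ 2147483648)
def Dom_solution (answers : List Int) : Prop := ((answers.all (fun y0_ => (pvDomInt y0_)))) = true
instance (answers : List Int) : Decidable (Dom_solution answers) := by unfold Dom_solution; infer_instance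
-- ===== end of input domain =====

-- B replaces A's per-question comparison against the three patterns by a histogram of
-- (index mod 40, answer) pairs (40 = lcm of the pattern lengths); each score is then a
-- 40-term lookup sum. Same results; a genuinely different counting structure.

-- ===== PORT A =====
-- Python 'scores = [0] * 4' is a fixed-size list; ported as a quadruple (slot 0 stays 0, exactly as in the Python).
def solution (answers : List Int) : List Int :=
  let fst : List Int := [1, 2, 3, 4, 5]
  let sec : List Int := [2, 1, 2, 3, 2, 4, 2, 5]
  let thd : List Int := [3, 3, 1, 1, 2, 2, 4, 4, 5, 5]
  let scores :=
    (PySem.List.pyRange 0 answers.length 1).foldl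
      (fun (sc : Int × Int × Int × Int) num =>
        let sc := if PySem.List.pyGetD fst (PySem.Int.mod num fst.length) 0 = PySem.List.pyGetD answers num 0
                  then (sc.1, sc.2.1 + 1, sc.2.2.1, sc.2.2.2) else sc
        let sc := if PySem.List.pyGetD sec (PySem.Int.mod num sec.length) 0 = PySem.List.pyGetD answers num 0
                  then (sc.1, sc.2.1, sc.2.2.1 + 1, sc.2.2.2) else sc
        if PySem.List.pyGetD thd (PySem.Int.mod num thd.length) 0 = PySem.List.pyGetD answers num 0
                  then (sc.1, sc.2.1, sc.2.2.1, sc.2.2.2 + 1) else sc)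
      ((0 : Int), (0 : Int), (0 : Int), (0 : Int))
  -- max(scores) over the 4-element list [0, s1, s2, s3]
  let max_score := max (max (max scores.1 scores.2.1) scores.2.2.1) scores.2.2.2
  let top_rank := (PySem.List.pyRange 1 (3 + 1) 1).filter (fun i =>
      (if i = 1 then scores.2.1 else if i = 2 then scores.2.2.1 else scores.2.2.2) = max_score)
  PySem.List.sorted top_rank (fun x => x) false

-- ===== PORT B =====
def solution_alt (answers : List Int) : List Int :=
  -- hist[(i % 40, a)] += 1, via dict.get
  let hist := (PySem.List.enumerate answers 0).foldl
      (fun (d : PySem.Dict (Int × Int) Int) p =>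
        d.insert (PySem.Int.mod p.1 40, p.2) (d.getD (PySem.Int.mod p.1 40, p.2) 0 + 1))
      PySem.Dict.empty
  let patterns : List (List Int) :=
    [[1, 2, 3, 4, 5], [2, 1, 2, 3, 2, 4, 2, 5], [3, 3, 1, 1, 2, 2, 4, 4, 5, 5]]
  let scores := patterns.map (fun pat =>
    ((PySem.List.pyRange 0 40 1).map (fun r =>
        hist.getD (r, PySem.List.pyGetD pat (PySem.Int.mod r pat.length) 0) 0)).sum)
  -- max(scores): scores always has 3 elements, so max? is some
  let best := (PySem.List.max? scores (fun x => x)).getD 0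
  ([1, 2, 3] : List Int).filter (fun k => PySem.List.pyGetD scores (k - 1) 0 = best)

-- ===== PRECONDITION & SPEC =====
def Spec_solution (answers : List Int) (out : List Int) : Prop := out = solution_alt answers
instance (answers : List Int) (out : List Int) : Decidable (Spec_solution answers out) := by unfold Spec_solution; infer_instance

-- ===== CLAIM (what is proved, stated in full; the proofs are below) =====
def Claim_equal_solution : Prop := ∀ (answers : List Int), Dom_solution answers → Spec_solution answers (solution answers)

-- ===== LEMMAS AND PROOFS =====

set_option maxHeartbeats 1000000 in
-- A's loop over (index, value) pairs splits into three independent 0/1 counts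
theorem pvFoldSplit (f g h : Int × Int → Prop) [DecidablePred f] [DecidablePred g] [DecidablePred h] :
    ∀ (L : List (Int × Int)) (w x y z : Int),
    L.foldl (fun (sc : Int × Int × Int × Int) p =>
        let sc := if f p then (sc.1, sc.2.1 + 1, sc.2.2.1, sc.2.2.2) else sc
        let sc := if g p then (sc.1, sc.2.1, sc.2.2.1 + 1, sc.2.2.2) else sc
        if h p then (sc.1, sc.2.1, sc.2.2.1, sc.2.2.2 + 1) else sc) (w, x, y, z)
    = (w, x + (L.countP (fun p => decide (f p)) : Int),
          y + (L.countP (fun p => decide (g p)) : Int),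
          z + (L.countP (fun p => decide (h p)) : Int))
  | [], w, x, y, z => by simp
  | p :: L, w, x, y, z => by
      have IH := pvFoldSplit f g h L
      simp only [List.foldl_cons, List.countP_cons]
      split_ifs <;> rw [IH] <;> simp_all <;> omega

-- a one-hot sum over [0, 40): exactly the term r = m contributes
theorem pvOneHot : ∀ (L : List Int), L.Nodup → ∀ (m p2 : Int) (v : Int → Int), m ∈ L →
    (L.map (fun r => if ((m, p2) : Int × Int) = (r, v r) then (1 : Int) else 0)).sum
    = if v m = p2 then 1 else 0
  | [], _, _, _, _, hm => by simp at hm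
  | a :: L, hnd, m, p2, v, hm => by
      simp only [List.map_cons, List.sum_cons]
      by_cases ham : a = m
      · subst ham
        have hz : (L.map (fun r => if ((a, p2) : Int × Int) = (r, v r) then (1 : Int) else 0)).sum = 0 := by
          have : ∀ r ∈ L, (if ((a, p2) : Int × Int) = (r, v r) then (1 : Int) else 0) = 0 := by
            intro r hr
            have : a ≠ r := fun h => (List.nodup_cons.mp hnd).1 (h ▸ hr)
            simp [Prod.ext_iff, this]
          rw [List.map_congr_left this]
          simp
        rw [hz]
        by_cases hv : v a = p2
        · simp [hv]
        · have hv' : ¬ p2 = v a := fun h => hv h.symm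
          simp [Prod.ext_iff, hv, hv']
      · have hmL : m ∈ L := by
          rcases List.mem_cons.mp hm with h | h
          · exact absurd h.symm ham
          · exact h
        have hhd : (if ((m, p2) : Int × Int) = (a, v a) then (1 : Int) else 0) = 0 := by
          have hne : ((m, p2) : Int × Int) ≠ (a, v a) := by
            intro h; exact ham ((Prod.ext_iff.mp h).1.symm)
          simp [hne]
        rw [hhd, pvOneHot L (List.nodup_cons.mp hnd).2 m p2 v hmL]
        ring

-- the 40-term histogram sum equals the direct match count
theorem pvHistSum : ∀ (E : List (Int × Int)) (v : Int → Int),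
    ((PySem.List.pyRange 0 40 1).map (fun r =>
        (((E.map (fun p => (PySem.Int.mod p.1 40, p.2))).count ((r, v r) : Int × Int)) : Int))).sum
    = (E.countP (fun p => decide (v (PySem.Int.mod p.1 40) = p.2)) : Int)
  | [], v => by simp
  | p :: E, v => by
      have IH := pvHistSum E v
      simp only [List.map_cons, List.count_cons, List.countP_cons]
      have hsplit : ∀ r : Int,
          (((E.map (fun p => (PySem.Int.mod p.1 40, p.2))).count ((r, v r) : Int × Int)
            + if ((PySem.Int.mod p.1 40, p.2) : Int × Int) == (r, v r) then 1 else 0 : Nat) : Int)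
          = (((E.map (fun p => (PySem.Int.mod p.1 40, p.2))).count ((r, v r) : Int × Int)) : Int)
            + (if ((PySem.Int.mod p.1 40, p.2) : Int × Int) = (r, v r) then (1 : Int) else 0) := by
        intro r; by_cases h : ((PySem.Int.mod p.1 40, p.2) : Int × Int) = (r, v r) <;> simp_all
      calc ((PySem.List.pyRange 0 40 1).map (fun r =>
              (((E.map (fun q => (PySem.Int.mod q.1 40, q.2))).count ((r, v r) : Int × Int)
                + if ((PySem.Int.mod p.1 40, p.2) : Int × Int) == (r, v r) then 1 else 0 : Nat) : Int))).sum
          = ((PySem.List.pyRange 0 40 1).map (fun r =>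
              (((E.map (fun q => (PySem.Int.mod q.1 40, q.2))).count ((r, v r) : Int × Int)) : Int)
              + (if ((PySem.Int.mod p.1 40, p.2) : Int × Int) = (r, v r) then (1 : Int) else 0))).sum := by
            exact congrArg List.sum (List.map_congr_left (fun r _ => hsplit r))
        _ = (E.countP (fun q => decide (v (PySem.Int.mod q.1 40) = q.2)) : Int)
              + (if v (PySem.Int.mod p.1 40) = p.2 then (1 : Int) else 0) := by
            rw [PySem.List.sum_map_add_int, IH,
                pvOneHot (PySem.List.pyRange 0 40 1) (by decide) (PySem.Int.mod p.1 40) p.2 v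
                  (PySem.List.mem_pyRange_one.mpr
                    ⟨PySem.Int.mod_nonneg p.1 (by norm_num), PySem.Int.mod_lt p.1 (by norm_num)⟩)]
        _ = _ := by by_cases h : v (PySem.Int.mod p.1 40) = p.2 <;> simp

-- i % 40 % len = i % len for len ∣ 40
theorem pvModMod (i len : Int) (hpos : 0 < len) (hdvd : len ∣ 40) :
    PySem.Int.mod (PySem.Int.mod i 40) len = PySem.Int.mod i len := by
  rw [PySem.Int.mod_eq_emod_of_pos (by norm_num : (0:Int) < 40),
      PySem.Int.mod_eq_emod_of_pos hpos, PySem.Int.mod_eq_emod_of_pos hpos,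
      Int.emod_emod_of_dvd i hdvd]

-- B's score for one pattern equals A's direct count for that pattern
theorem pvScore (answers pat : List Int) (hpos : 0 < (pat.length : Int)) (hdvd : (pat.length : Int) ∣ 40) :
    ((PySem.List.pyRange 0 40 1).map (fun r =>
        ((PySem.List.enumerate answers 0).foldl
          (fun (d : PySem.Dict (Int × Int) Int) p =>
            d.insert (PySem.Int.mod p.1 40, p.2) (d.getD (PySem.Int.mod p.1 40, p.2) 0 + 1))
          PySem.Dict.empty).getD (r, PySem.List.pyGetD pat (PySem.Int.mod r pat.length) 0) 0)).sum
    = ((PySem.List.enumerate answers 0).countP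
        (fun p => decide (PySem.List.pyGetD pat (PySem.Int.mod p.1 pat.length) 0 = p.2)) : Int) := by
  have hfold : ∀ r : Int, ∀ v : Int,
      ((PySem.List.enumerate answers 0).foldl
        (fun (d : PySem.Dict (Int × Int) Int) p =>
          d.insert (PySem.Int.mod p.1 40, p.2) (d.getD (PySem.Int.mod p.1 40, p.2) 0 + 1))
        PySem.Dict.empty).getD (r, v) 0
      = (((PySem.List.enumerate answers 0).map (fun p => (PySem.Int.mod p.1 40, p.2))).count ((r, v) : Int × Int) : Int) := by
    intro r v
    have := PySem.Dict.getD_foldl_insert_add_one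
      ((PySem.List.enumerate answers 0).map (fun p => (PySem.Int.mod p.1 40, p.2)))
      (PySem.Dict.empty : PySem.Dict (Int × Int) Int) ((r, v) : Int × Int)
    rw [List.foldl_map] at this
    simpa using this
  rw [List.map_congr_left (fun r _ => hfold r _)]
  rw [pvHistSum (PySem.List.enumerate answers 0)
        (fun r => PySem.List.pyGetD pat (PySem.Int.mod r pat.length) 0)]
  congr 1
  apply List.countP_congr
  intro p _
  simp only [pvModMod p.1 (pat.length : Int) hpos hdvd]

-- the tail end: picking the 1-based positions of the maximum, both ways
theorem pvPick (a b c : Int) (ha : 0 ≤ a) :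
    PySem.List.sorted ((PySem.List.pyRange 1 (3 + 1) 1).filter (fun i =>
        (if i = 1 then a else if i = 2 then b else c) = max (max (max 0 a) b) c)) (fun x => x) false
    = ([1, 2, 3] : List Int).filter (fun k =>
        PySem.List.pyGetD [a, b, c] (k - 1) 0 = (PySem.List.max? [a, b, c] (fun x => x)).getD 0) := by
  have h0 : max 0 a = a := max_eq_right ha
  have hr : PySem.List.pyRange 1 (3 + 1) 1 = [1, 2, 3] := by decide
  have hm : (PySem.List.max? [a, b, c] (fun x => x)).getD 0 = max (max a b) c := by
    rw [PySem.List.max?_id_cons]; simp [List.foldl]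
  rw [hr, hm, h0]
  have hflt : ∀ (q : Int → Bool), List.Pairwise (fun x y : Int => x < y) (([1, 2, 3] : List Int).filter q) := by
    intro q
    exact List.Pairwise.filter q (by decide)
  have g1 : PySem.List.pyGetD [a, b, c] 0 0 = a := rfl
  have g2 : PySem.List.pyGetD [a, b, c] 1 0 = b := rfl
  have g3 : PySem.List.pyGetD [a, b, c] 2 0 = c := rfl
  have heq : (([1, 2, 3] : List Int).filter (fun i =>
        (if i = 1 then a else if i = 2 then b else c) = max (max a b) c))
      = (([1, 2, 3] : List Int).filter (fun k =>
        PySem.List.pyGetD [a, b, c] (k - 1) 0 = max (max a b) c)) := by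
    apply List.filter_congr
    intro k hk
    fin_cases hk <;> simp [g1, g2, g3]
  rw [heq]
  exact PySem.List.sorted_eq_of_perm_of_pairwise_lt _ _ _ (List.Perm.refl _) (hflt _)

theorem pvMain (answers : List Int) : solution answers = solution_alt answers := by
  have hmap : PySem.List.enumerate answers (0 : Int)
      = (PySem.List.pyRange 0 (answers.length : Int) 1).map
          (fun j => (j, PySem.List.pyGetD answers j 0)) := by
    simpa using PySem.List.enumerate_eq_map_pyRange (xs := answers) (d := 0)
  simp only [solution, solution_alt]
  -- A's fold, expressed as three counts over the enumerate pairs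
  have hfold :
      (PySem.List.pyRange 0 (answers.length : Int) 1).foldl
        (fun (sc : Int × Int × Int × Int) num =>
          let sc := if PySem.List.pyGetD [1, 2, 3, 4, 5] (PySem.Int.mod num ([1, 2, 3, 4, 5] : List Int).length) 0 = PySem.List.pyGetD answers num 0
                    then (sc.1, sc.2.1 + 1, sc.2.2.1, sc.2.2.2) else sc
          let sc := if PySem.List.pyGetD [2, 1, 2, 3, 2, 4, 2, 5] (PySem.Int.mod num ([2, 1, 2, 3, 2, 4, 2, 5] : List Int).length) 0 = PySem.List.pyGetD answers num 0
                    then (sc.1, sc.2.1, sc.2.2.1 + 1, sc.2.2.2) else sc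
          if PySem.List.pyGetD [3, 3, 1, 1, 2, 2, 4, 4, 5, 5] (PySem.Int.mod num ([3, 3, 1, 1, 2, 2, 4, 4, 5, 5] : List Int).length) 0 = PySem.List.pyGetD answers num 0
                    then (sc.1, sc.2.1, sc.2.2.1, sc.2.2.2 + 1) else sc)
        ((0 : Int), (0 : Int), (0 : Int), (0 : Int))
      = ((0 : Int),
         ((PySem.List.enumerate answers 0).countP (fun p => decide (PySem.List.pyGetD [1, 2, 3, 4, 5] (PySem.Int.mod p.1 ([1, 2, 3, 4, 5] : List Int).length) 0 = p.2)) : Int),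
         ((PySem.List.enumerate answers 0).countP (fun p => decide (PySem.List.pyGetD [2, 1, 2, 3, 2, 4, 2, 5] (PySem.Int.mod p.1 ([2, 1, 2, 3, 2, 4, 2, 5] : List Int).length) 0 = p.2)) : Int),
         ((PySem.List.enumerate answers 0).countP (fun p => decide (PySem.List.pyGetD [3, 3, 1, 1, 2, 2, 4, 4, 5, 5] (PySem.Int.mod p.1 ([3, 3, 1, 1, 2, 2, 4, 4, 5, 5] : List Int).length) 0 = p.2)) : Int)) := by
    have h2 := pvFoldSplit
      (fun p : Int × Int => PySem.List.pyGetD [1, 2, 3, 4, 5] (PySem.Int.mod p.1 ([1, 2, 3, 4, 5] : List Int).length) 0 = p.2)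
      (fun p : Int × Int => PySem.List.pyGetD [2, 1, 2, 3, 2, 4, 2, 5] (PySem.Int.mod p.1 ([2, 1, 2, 3, 2, 4, 2, 5] : List Int).length) 0 = p.2)
      (fun p : Int × Int => PySem.List.pyGetD [3, 3, 1, 1, 2, 2, 4, 4, 5, 5] (PySem.Int.mod p.1 ([3, 3, 1, 1, 2, 2, 4, 4, 5, 5] : List Int).length) 0 = p.2)
      (PySem.List.enumerate answers 0) 0 0 0 0
    conv at h2 => lhs; rw [hmap, List.foldl_map]
    simpa using h2
  rw [hfold]
  simp only [List.map_cons, List.map_nil]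
  simp only [pvScore answers [1, 2, 3, 4, 5] (by norm_num) (by norm_num),
      pvScore answers [2, 1, 2, 3, 2, 4, 2, 5] (by norm_num) (by norm_num),
      pvScore answers [3, 3, 1, 1, 2, 2, 4, 4, 5, 5] (by norm_num) (by norm_num)]
  exact pvPick _ _ _ (Int.natCast_nonneg _)

-- ===== VERDICT (by name: the statement is the Claim_ definition above) =====
theorem solution_spec : Claim_equal_solution := by
  intro answers _
  exact pvMain answers
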